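-- pv_equiv track=rewrite | github.com/tomdif/jt-gravity-from-convex-subsets | scripts/05_beta_scaling.py | enumerate_cc_varwidth
-- ===== SOURCE A (Python) =====
-- def enumerate_cc_varwidth(row_widths):
--     n_rows = len(row_widths)
--     cells = [(r,c) for r in range(n_rows) for c in range(row_widths[r])]
--     n = len(cells)
--     cell_set = set(cells)
--     results = []
--     for bits in range(1 << n):
--         S = frozenset(cells[k] for k in range(n) if bits & (1 << k))
--         convex = True
--         for a in S:
--             if not convex: break
--             for b in S:
--                 if not convex: break
--                 if a[0] <= b[0] and a[1] <= b[1]: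
--                     for r in range(a[0], b[0]+1):
--                         for c in range(a[1], b[1]+1):
--                             if (r,c) in cell_set and (r,c) not in S:
--                                 convex = False; break
--                         if not convex: break
--         if convex:
--             links = sum(1 for (r,c) in S if (r+1,c) in S) + \
--                     sum(1 for (r,c) in S if (r,c+1) in S)
--             results.append(len(S) - links)
--     return results
-- ===== SOURCE B (Python) =====
-- def enumerate_cc_varwidth(row_widths):
--     cells = [(r, c) for r in range(len(row_widths)) for c in range(row_widths[r])]
--     n = len(cells)
--     results = []
--     for bits in range(1 << n):
--         members = [cells[k] for k in range(n) if bits >> k & 1]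
--         # S is convex iff no grid cell OUTSIDE S is sandwiched (componentwise)
--         # between two members: a <= p <= b with a,b in S forces p in S.
--         convex = True
--         for k in range(n):
--             if bits >> k & 1:
--                 continue
--             r, c = cells[k]
--             if any(a <= r and b <= c for (a, b) in members) and \
--                any(r <= a and c <= b for (a, b) in members):
--                 convex = False
--                 break
--         if convex:
--             links = sum(1 for (r, c) in members if (r + 1, c) in members) + \
--                     sum(1 for (r, c) in members if (r, c + 1) in members)
--             results.append(len(members) - links)
--     return results
-- ===== Notes on version B (the rewrite author's own statement) =====
-- stated objective: faster
-- what changed: The pairwise-rectangle convexity test (for every ordered pair a<=b in S scan the whole rectangle between them) is replaced by an equivalent per-cell test: S is convex iff no grid cell outside S is componentwise sandwiched between two members of S, checked with two linear any-scans per missing cell, dropping a factor of n per subset.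
import Mathlib
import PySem

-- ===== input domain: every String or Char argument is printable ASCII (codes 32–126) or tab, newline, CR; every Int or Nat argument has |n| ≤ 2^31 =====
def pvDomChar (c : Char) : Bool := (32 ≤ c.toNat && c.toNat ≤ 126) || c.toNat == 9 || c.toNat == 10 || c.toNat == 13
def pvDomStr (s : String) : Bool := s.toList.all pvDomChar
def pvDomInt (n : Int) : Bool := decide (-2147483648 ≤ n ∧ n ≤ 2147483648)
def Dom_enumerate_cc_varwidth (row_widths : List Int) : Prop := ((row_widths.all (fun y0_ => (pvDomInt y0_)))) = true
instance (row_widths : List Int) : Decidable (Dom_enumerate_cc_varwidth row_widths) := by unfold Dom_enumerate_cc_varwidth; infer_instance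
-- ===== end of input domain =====

-- B replaces A's pairwise-rectangle convexity test by an equivalent per-missing-cell
-- sandwich test (objective: faster; the per-subset cost loses a factor of the cell count).
-- Python's set/frozenset iteration order is not modelled; every consumption of S below
-- (all/any with a break, counting sums) is order-independent, so a list is exact here.

-- cells = [(r,c) for r in range(n_rows) for c in range(row_widths[r])] — this comprehension
-- is verbatim the same line in Source A and Source B, so both ports share it.
-- (row_widths[r]: r is always in range, so the .getD default is never used)
def pvCells (row_widths : List Int) : List (Int × Int) :=
  (PySem.List.pyRange 0 (row_widths.length : Int) 1).flatMap (fun r =>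
    (PySem.List.pyRange 0 ((PySem.List.pyGet? row_widths r).getD 0) 1).map (fun c => (r, c)))

-- ===== PORT A =====
-- bits ranges over range(1 << n): all values nonnegative, represented as Nat;
-- Python's 'bits & (1 << k)' truthiness is 'bits &&& (1 <<< k) ≠ 0'.
def enumerate_cc_varwidth (row_widths : List Int) : List Int :=
  let cells := pvCells row_widths
  let n := cells.length
  let cell_set : PySem.Set (Int × Int) := PySem.Set.ofList cells
  (List.range (2 ^ n)).foldl (fun results bits =>
    let S : List (Int × Int) := PySem.Set.ofList ((List.range n).filterMap (fun (k : Nat) =>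
      if bits &&& (1 <<< k) ≠ 0 then some (PySem.List.pyGetD cells (k : Int) (0, 0)) else none))
    let convex := S.all (fun a => S.all (fun b =>
      if a.1 ≤ b.1 ∧ a.2 ≤ b.2 then
        (PySem.List.pyRange a.1 (b.1 + 1) 1).all (fun r =>
          (PySem.List.pyRange a.2 (b.2 + 1) 1).all (fun c =>
            !(PySem.Set.contains cell_set (r, c)) || S.contains (r, c)))
      else true))
    if convex then
      let links : Int := (S.countP (fun p => S.contains (p.1 + 1, p.2)) : Int)
                       + (S.countP (fun p => S.contains (p.1, p.2 + 1)) : Int)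
      results ++ [(S.length : Int) - links]
    else results) []

-- ===== PORT B =====
-- Source B builds the same cells list (shared comprehension pvCells above); per subset it
-- checks, for every grid cell with an unset bit, whether it is componentwise sandwiched
-- between two members ('bits >> k & 1' is '(bits >>> k) &&& 1').
def enumerate_cc_varwidth_alt (row_widths : List Int) : List Int :=
  let cells := pvCells row_widths
  let n := cells.length
  (List.range (2 ^ n)).foldl (fun results bits =>
    let members : List (Int × Int) := (List.range n).filterMap (fun (k : Nat) =>
      if (bits >>> k) &&& 1 = 1 then some (PySem.List.pyGetD cells (k : Int) (0, 0)) else none)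
    let convex := (List.range n).all (fun (k : Nat) =>
      if (bits >>> k) &&& 1 = 1 then true
      else
        let p := PySem.List.pyGetD cells (k : Int) (0, 0)
        !(members.any (fun a => a.1 ≤ p.1 ∧ a.2 ≤ p.2) &&
          members.any (fun a => p.1 ≤ a.1 ∧ p.2 ≤ a.2)))
    if convex then
      let links : Int := (members.countP (fun p => members.contains (p.1 + 1, p.2)) : Int)
                       + (members.countP (fun p => members.contains (p.1, p.2 + 1)) : Int)
      results ++ [(members.length : Int) - links]
    else results) []

-- ===== PRECONDITION & SPEC =====
def Spec_enumerate_cc_varwidth (row_widths : List Int) (out : List Int) : Prop := out = enumerate_cc_varwidth_alt row_widths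
instance (row_widths : List Int) (out : List Int) : Decidable (Spec_enumerate_cc_varwidth row_widths out) := by unfold Spec_enumerate_cc_varwidth; infer_instance

-- ===== CLAIM (what is proved, stated in full; the proofs are below) =====
def Claim_equal_enumerate_cc_varwidth : Prop := ∀ (row_widths : List Int), Dom_enumerate_cc_varwidth row_widths → Spec_enumerate_cc_varwidth row_widths (enumerate_cc_varwidth row_widths)

-- ===== LEMMAS AND PROOFS =====

-- A's bit test 'bits & (1 << k)' and B's 'bits >> k & 1' are both Nat.testBit.
theorem pvTestA (bits k : Nat) : (bits &&& (1 <<< k) ≠ 0) ↔ bits.testBit k = true := by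
  rw [Nat.one_shiftLeft, Nat.and_two_pow]
  cases h : bits.testBit k <;> simp [Nat.pow_eq_zero]

theorem pvTestB (bits k : Nat) : ((bits >>> k) &&& 1 = 1) ↔ bits.testBit k = true := by
  rw [Nat.and_one_is_mod, Nat.shiftRight_eq_div_pow]
  simp [Nat.testBit_eq_decide_div_mod_eq]

theorem pvIfA {α : Sort _} (bits k : Nat) (x y : α) :
    (if bits &&& (1 <<< k) ≠ 0 then x else y) = (if bits.testBit k = true then x else y) :=
  if_congr (pvTestA bits k) rfl rfl

theorem pvIfB {α : Sort _} (bits k : Nat) (x y : α) :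
    (if (bits >>> k) &&& 1 = 1 then x else y) = (if bits.testBit k = true then x else y) :=
  if_congr (pvTestB bits k) rfl rfl

-- set(xs) of a duplicate-free list is the list itself
theorem pvAddAppend {α : Type} [BEq α] [LawfulBEq α] (s : List α) (x : α) (hx : x ∉ s) :
    PySem.Set.add s x = s ++ [x] := by
  simp [PySem.Set.add, PySem.Set.contains, hx]

theorem pvFoldlAdd {α : Type} [BEq α] [LawfulBEq α] (l : List α) :
    ∀ (s : List α), (s ++ l).Nodup → l.foldl PySem.Set.add s = s ++ l := by
  induction l with
  | nil => intro s _; simp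
  | cons x xs ih =>
    intro s h
    have h2 := List.nodup_append.mp h
    have hx : x ∉ s := fun hm => h2.2.2 x hm x (List.mem_cons_self) rfl
    rw [List.foldl_cons, pvAddAppend s x hx, ih (s ++ [x]) (by simpa using h)]
    simp

theorem pvOfList_nodup {α : Type} [BEq α] [LawfulBEq α] (l : List α) (h : l.Nodup) :
    PySem.Set.ofList l = l := by
  rw [PySem.Set.ofList_eq_foldl]
  simpa using pvFoldlAdd l [] (by simpa using h)

-- the grid cell list is duplicate-free
theorem pvCells_nodup (row_widths : List Int) : (pvCells row_widths).Nodup := by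
  unfold pvCells
  rw [List.nodup_flatMap]
  constructor
  · intro r _
    exact List.Nodup.map (fun a b h => (Prod.ext_iff.mp h).2) (by apply PySem.List.nodup_pyRange_one)
  · have hp : (PySem.List.pyRange 0 (row_widths.length : Int) 1).Pairwise (· < ·) := by
      apply PySem.List.pairwise_lt_pyRange_one
    refine hp.imp fun {r1 r2} hlt => ?_
    intro x hx1 hx2
    rcases List.mem_map.mp hx1 with ⟨c1, _, rfl⟩
    rcases List.mem_map.mp hx2 with ⟨c2, _, he⟩
    exact absurd (Prod.ext_iff.mp he).1 (ne_of_gt hlt)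

-- membership in the selected sublist
theorem pvMemL (cells : List (Int × Int)) (bits : Nat) (m : Nat) (p : Int × Int) :
    p ∈ (List.range m).filterMap (fun (k : Nat) =>
        if bits.testBit k = true then some (cells.getD k (0, 0)) else none) ↔
      ∃ k, k < m ∧ bits.testBit k = true ∧ cells.getD k (0, 0) = p := by
  simp [List.mem_filterMap, Option.ite_none_right_eq_some]

theorem pvGetDInj (cells : List (Int × Int)) (hnd : cells.Nodup) :
    ∀ i j, i < cells.length → j < cells.length →
      cells.getD i (0, 0) = cells.getD j (0, 0) → i = j := by
  intro i j hi hj hEq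
  rw [List.getD_eq_getElem _ _ hi, List.getD_eq_getElem _ _ hj] at hEq
  rcases lt_trichotomy i j with h | h | h
  · exact absurd hEq (List.pairwise_iff_getElem.mp hnd i j hi hj h)
  · exact h
  · exact absurd hEq.symm (List.pairwise_iff_getElem.mp hnd j i hj hi h)

theorem pvL_nodup (cells : List (Int × Int)) (hnd : cells.Nodup) (bits : Nat) :
    ∀ m, m ≤ cells.length →
      ((List.range m).filterMap (fun (k : Nat) =>
        if bits.testBit k = true then some (cells.getD k (0, 0)) else none)).Nodup := by
  intro m
  induction m with
  | zero => intro _; simp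
  | succ m ih =>
    intro hm
    rw [List.range_succ, List.filterMap_append]
    apply List.Nodup.append (ih (by omega)) ?_ ?_
    · by_cases h : bits.testBit m = true <;> simp [h]
    · intro x hx1 hx2
      rcases (pvMemL cells bits m x).mp hx1 with ⟨k, hk, _, he⟩
      have hx : cells.getD m (0, 0) = x := by
        by_cases h : bits.testBit m = true <;> simp [h] at hx2
        · exact hx2.symm
      have := pvGetDInj cells hnd k m (by omega) (by omega) (he.trans hx.symm)
      omega

-- ite shapes of the two convexity loops
theorem pvAbody {c : Prop} [Decidable c] {x : Bool} :
    ((if c then x else true) = true) ↔ (c → x = true) := by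
  split_ifs with h <;> simp [h]

theorem pvBbody {c : Prop} [Decidable c] {x y : Bool} :
    ((if c then true else !(x && y)) = true) ↔ (¬c → x = true → y = true → False) := by
  split_ifs with h
  · simp [h]
  · cases x <;> cases y <;> simp [h]

theorem pvStep_eq (row_widths : List Int) :
    enumerate_cc_varwidth row_widths = enumerate_cc_varwidth_alt row_widths := by
  simp only [enumerate_cc_varwidth, enumerate_cc_varwidth_alt]
  have hnd : (pvCells row_widths).Nodup := pvCells_nodup row_widths
  set cells := pvCells row_widths with hc
  apply List.foldl_ext
  intro acc bits _
  simp only [pvIfA, pvIfB, PySem.List.pyGetD_natCast]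
  set L := (List.range cells.length).filterMap (fun (k : Nat) =>
    if bits.testBit k = true then some (cells.getD k (0, 0)) else none) with hLdef
  have hLnd : L.Nodup := pvL_nodup cells hnd bits cells.length le_rfl
  rw [pvOfList_nodup L hLnd, pvOfList_nodup cells hnd]
  have hmem : ∀ p : Int × Int, p ∈ L ↔
      ∃ k, k < cells.length ∧ bits.testBit k = true ∧ cells.getD k (0, 0) = p := by
    intro p
    rw [hLdef]
    exact pvMemL cells bits cells.length p
  have hnotin : ∀ k, k < cells.length → bits.testBit k = false → cells.getD k (0, 0) ∉ L := by
    intro k hk hb hin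
    rcases (hmem _).mp hin with ⟨k', hk', hb', he⟩
    have := pvGetDInj cells hnd k' k hk' hk he
    subst this
    simp [hb] at hb'
  have hconv :
      (L.all (fun a => L.all (fun b =>
        if a.1 ≤ b.1 ∧ a.2 ≤ b.2 then
          (PySem.List.pyRange a.1 (b.1 + 1) 1).all (fun r =>
            (PySem.List.pyRange a.2 (b.2 + 1) 1).all (fun c =>
              !(PySem.Set.contains cells (r, c)) || L.contains (r, c)))
        else true)))
      = (List.range cells.length).all (fun (k : Nat) =>
          if bits.testBit k = true then true
          else
            !(L.any (fun a => a.1 ≤ (cells.getD k (0, 0)).1 ∧ a.2 ≤ (cells.getD k (0, 0)).2) &&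
              L.any (fun a => (cells.getD k (0, 0)).1 ≤ a.1 ∧ (cells.getD k (0, 0)).2 ≤ a.2))) := by
    rw [Bool.eq_iff_iff]
    simp only [List.all_eq_true, List.any_eq_true, List.mem_range, pvAbody, pvBbody,
      Bool.or_eq_true, Bool.not_eq_true', Bool.not_eq_true, decide_eq_true_eq,
      decide_eq_false_iff_not, PySem.List.mem_pyRange_one,
      PySem.Set.contains_eq_listContains, List.contains_eq_mem]
    constructor
    · -- pairwise-rectangle convexity implies the sandwich test
      intro hA k hk hbit h1 h2
      obtain ⟨a, haL, ha1, ha2⟩ := h1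
      obtain ⟨b, hbL, hb1, hb2⟩ := h2
      have hpc : cells.getD k (0, 0) ∈ cells := by
        rw [List.getD_eq_getElem _ _ hk]
        exact List.getElem_mem hk
      have hres := hA a haL b hbL ⟨le_trans ha1 hb1, le_trans ha2 hb2⟩
        (cells.getD k (0, 0)).1 ⟨ha1, by omega⟩ (cells.getD k (0, 0)).2 ⟨ha2, by omega⟩
      rcases hres with h | h
      · exact h hpc
      · exact hnotin k hk hbit h
    · -- the sandwich test implies pairwise-rectangle convexity
      intro hB a haL b hbL hab r hr c hc
      by_cases hrc : (r, c) ∈ cells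
      · by_cases hL : (r, c) ∈ L
        · exact Or.inr hL
        · exfalso
          rcases List.mem_iff_getElem.mp hrc with ⟨k, hk, he⟩
          have heD : cells.getD k (0, 0) = (r, c) := by
            rw [List.getD_eq_getElem _ _ hk, he]
          have hbit : bits.testBit k = false := by
            rcases hb : bits.testBit k with _ | _
            · rfl
            · exact absurd ((hmem _).mpr ⟨k, hk, hb, heD⟩) hL
          refine hB k hk hbit ⟨a, haL, ?_⟩ ⟨b, hbL, ?_⟩
          · rw [heD]
            exact ⟨hr.1, hc.1⟩
          · rw [heD]
            have h1 : r ≤ b.1 := by omega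
            have h2 : c ≤ b.2 := by omega
            exact ⟨h1, h2⟩
      · exact Or.inl hrc
  rw [hconv]

-- ===== VERDICT (by name: the statement is the Claim_ definition above) =====
theorem enumerate_cc_varwidth_spec : Claim_equal_enumerate_cc_varwidth := by
  intro rws _
  exact pvStep_eq rws
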